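-- pv_equiv track=rewrite | github.com/BorisPolonsky/zh-NER-TF | msra_bakeoff/build.py | char_bmeso_tag_stream
-- ===== SOURCE A (Python) =====
-- def char_bmeso_tag_stream(word_tag_pairs, non_entity_tag="O"):
--     """
--     Yield char-BMESO_tag pairs.
--     :param word_tag_pairs: Iterable word-tag sequence. e.g. [(word1, O), (word2, ORG), ...]
--     :param non_entity_tag: Non-entity tag.
--     :return:
--     """
--     for word, tag in word_tag_pairs:
--         if tag == non_entity_tag:
--             for ch in word:
--                 yield ch, non_entity_tag
--         else:
--             for i, ch in enumerate(word):
--                 if i == 0: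
--                     bmeso_tag = ("B-%s" if len(word) > 1 else "S-%s") % tag
--                 elif i == len(word) - 1:
--                     bmeso_tag = "E-%s" % tag
--                 else:
--                     bmeso_tag = "M-%s" % tag
--                 yield ch, bmeso_tag
-- ===== SOURCE B (Python) =====
-- def char_bmeso_tag_stream(word_tag_pairs, non_entity_tag="O"):
--     # Stage 1: flatten everything into one char stream, marking each char that
--     # ends its word (no per-word length/index logic survives past this point).
--     stream = [(ch, tag, i == len(word) - 1)
--               for word, tag in word_tag_pairs
--               for i, ch in enumerate(word)]
--     # Stage 2: a single state-machine scan; `start` carries whether the current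
--     # char opens a word (true initially and right after any end-of-word mark).
--     start = True
--     for ch, tag, is_end in stream:
--         if tag == non_entity_tag:
--             yield ch, non_entity_tag
--         else:
--             pre = ("S" if is_end else "B") if start else ("E" if is_end else "M")
--             yield ch, pre + "-" + tag
--         start = is_end
-- ===== Notes on version B (the rewrite author's own statement) =====
-- stated objective: alternative
-- what changed: B replaces A's per-word nested loop with index branching by a two-stage pipeline: it first flattens all pairs into one char stream carrying only end-of-word marks, then tags it with a single state-machine scan whose carried boolean 'start' replaces all index/length arithmetic.
import Mathlib
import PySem

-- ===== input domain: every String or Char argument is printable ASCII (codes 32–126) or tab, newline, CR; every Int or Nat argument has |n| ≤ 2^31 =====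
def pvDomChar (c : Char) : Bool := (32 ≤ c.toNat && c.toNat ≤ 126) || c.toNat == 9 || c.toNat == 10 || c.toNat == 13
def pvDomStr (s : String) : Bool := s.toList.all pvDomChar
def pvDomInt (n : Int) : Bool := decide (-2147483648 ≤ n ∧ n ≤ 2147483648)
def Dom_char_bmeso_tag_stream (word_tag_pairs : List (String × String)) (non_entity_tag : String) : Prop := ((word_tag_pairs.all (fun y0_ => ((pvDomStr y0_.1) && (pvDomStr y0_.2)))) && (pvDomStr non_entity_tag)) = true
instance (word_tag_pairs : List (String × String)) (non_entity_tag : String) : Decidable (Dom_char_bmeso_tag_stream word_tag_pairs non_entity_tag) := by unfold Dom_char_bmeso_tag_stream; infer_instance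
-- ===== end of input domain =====

-- B is a two-stage pipeline (flatten to a marked char stream, then one state-machine scan)
-- instead of A's nested per-word loop with index branching; equivalence of return values, same cost.
-- ===== PORT A =====
-- per-word yields of A's loop body: branch per character on its index
def pvAWord (cs : List Char) (tag : String) (non_entity_tag : String) : List (String × String) :=
  if tag == non_entity_tag then
    cs.map (fun ch => (String.mk [ch], non_entity_tag))
  else
    (PySem.List.enumerate cs).map (fun p =>
      (String.mk [p.2],
        if p.1 == 0 then (if cs.length > 1 then "B-" ++ tag else "S-" ++ tag)
        else if p.1 == (cs.length : Int) - 1 then "E-" ++ tag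
        else "M-" ++ tag))

def char_bmeso_tag_stream (word_tag_pairs : List (String × String)) (non_entity_tag : String) : List (String × String) :=
  word_tag_pairs.foldl (fun acc wt => acc ++ pvAWord wt.1.toList wt.2 non_entity_tag) []

-- ===== PORT B =====
-- stage 1: the comprehension flattening all pairs into one marked char stream
def pvBStream (word_tag_pairs : List (String × String)) : List (Char × String × Bool) :=
  word_tag_pairs.flatMap (fun wt =>
    (PySem.List.enumerate wt.1.toList).map (fun p =>
      (p.2, wt.2, p.1 == (wt.1.toList.length : Int) - 1)))

-- stage 2 loop body: state is (start, emitted list); `start` is updated to the char's end mark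
def pvBStep (net : String) (st : Bool × List (String × String)) (x : Char × String × Bool) :
    Bool × List (String × String) :=
  (x.2.2,
    st.2 ++ [(String.mk [x.1],
      if x.2.1 == net then net
      else (if st.1 then (if x.2.2 then "S" else "B") else (if x.2.2 then "E" else "M")) ++ "-" ++ x.2.1)])

def char_bmeso_tag_stream_alt (word_tag_pairs : List (String × String)) (non_entity_tag : String) : List (String × String) :=
  ((pvBStream word_tag_pairs).foldl (pvBStep non_entity_tag) (true, [])).2

-- ===== PRECONDITION & SPEC =====
def Spec_char_bmeso_tag_stream (word_tag_pairs : List (String × String)) (non_entity_tag : String) (out : List (String × String)) : Prop := out = char_bmeso_tag_stream_alt word_tag_pairs non_entity_tag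
instance (word_tag_pairs : List (String × String)) (non_entity_tag : String) (out : List (String × String)) : Decidable (Spec_char_bmeso_tag_stream word_tag_pairs non_entity_tag out) := by unfold Spec_char_bmeso_tag_stream; infer_instance

-- ===== CLAIM =====
def Claim_equal_char_bmeso_tag_stream : Prop := ∀ (word_tag_pairs : List (String × String)) (non_entity_tag : String), Dom_char_bmeso_tag_stream word_tag_pairs non_entity_tag → Spec_char_bmeso_tag_stream word_tag_pairs non_entity_tag (char_bmeso_tag_stream word_tag_pairs non_entity_tag)

-- ===== LEMMAS AND PROOFS =====

-- recursive characterisation of one word's marked segment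
def pvMarkRec (tag : String) : List Char → List (Char × String × Bool)
  | [] => []
  | c :: rest => (c, tag, rest.isEmpty) :: pvMarkRec tag rest

theorem pvMarkRec_length (tag : String) (cs : List Char) :
    (pvMarkRec tag cs).length = cs.length := by
  induction cs with
  | nil => rfl
  | cons c rest ih => simp [pvMarkRec, ih]

theorem pvMarkRec_getElem (tag : String) (cs : List Char) (i : Nat)
    (h : i < (pvMarkRec tag cs).length) :
    (pvMarkRec tag cs)[i] =
      (cs[i]'(by rw [pvMarkRec_length] at h; exact h), tag, decide (i = cs.length - 1)) := by
  induction cs generalizing i with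
  | nil => simp [pvMarkRec_length] at h
  | cons c rest ih =>
    rcases i with _ | j
    · cases rest <;> simp [pvMarkRec]
    · have h' : j < (pvMarkRec tag rest).length := by
        simp [pvMarkRec] at h ⊢; omega
      simp only [pvMarkRec, List.getElem_cons_succ, ih j h']
      simp only [List.length_cons]
      congr 2
      simp only [decide_eq_decide]
      rw [pvMarkRec_length] at h'
      omega

-- B's per-word flatten segment equals the recursive marking
theorem pvSeg_eq_markRec (cs : List Char) (tag : String) :
    (PySem.List.enumerate cs).map (fun p => (p.2, tag, p.1 == (cs.length : Int) - 1)) =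
      pvMarkRec tag cs := by
  apply List.ext_getElem
  · simp [pvMarkRec_length]
  · intro i h1 h2
    simp only [List.getElem_map, PySem.List.getElem_enumerate, Int.zero_add]
    rw [pvMarkRec_getElem]
    have hi : i < cs.length := by simpa using h2.trans_eq (pvMarkRec_length tag cs)
    have hflag : ((i : Int) == (cs.length : Int) - 1) = decide (i = cs.length - 1) := by
      by_cases h : i = cs.length - 1
      · simp only [h]
        norm_num
        omega
      · simp only [decide_eq_false h, beq_eq_false_iff_ne, ne_eq]
        omega
    rw [hflag]

-- expected output of the scan on the tail of an entity word (first char already consumed)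
def pvTailOut (tag : String) : List Char → List (String × String)
  | [] => []
  | c :: rest => (String.mk [c], (if rest.isEmpty then "E" else "M") ++ "-" ++ tag) :: pvTailOut tag rest

theorem pvTailOut_length (tag : String) (cs : List Char) :
    (pvTailOut tag cs).length = cs.length := by
  induction cs with
  | nil => rfl
  | cons c rest ih => simp [pvTailOut, ih]

theorem pvTailOut_getElem (tag : String) (cs : List Char) (i : Nat)
    (h : i < (pvTailOut tag cs).length) :
    (pvTailOut tag cs)[i] =
      (String.mk [cs[i]'(by rw [pvTailOut_length] at h; exact h)],
        (if i = cs.length - 1 then "E" else "M") ++ "-" ++ tag) := by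
  induction cs generalizing i with
  | nil => simp [pvTailOut_length] at h
  | cons c rest ih =>
    rcases i with _ | j
    · cases rest <;> simp [pvTailOut]
    · have h' : j < (pvTailOut tag rest).length := by
        simp [pvTailOut] at h ⊢; omega
      simp only [pvTailOut, List.getElem_cons_succ, ih j h']
      rw [pvTailOut_length] at h'
      simp only [List.length_cons]
      congr 2
      by_cases hj : j = rest.length - 1
      · rw [if_pos hj, if_pos (by omega)]
      · rw [if_neg hj, if_neg (by omega)]

-- scanning a tail segment from start = false emits pvTailOut and ends in state true
theorem pvTailScan (net tag : String) (hne : (tag == net) = false) (cs : List Char)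
    (hcs : cs ≠ []) (acc : List (String × String)) :
    (pvMarkRec tag cs).foldl (pvBStep net) (false, acc) = (true, acc ++ pvTailOut tag cs) := by
  induction cs generalizing acc with
  | nil => exact absurd rfl hcs
  | cons c rest ih =>
    rcases rest with _ | ⟨r, rs⟩
    · simp [pvMarkRec, pvTailOut, pvBStep, hne]
    · have := ih (by simp) (acc ++ [(String.mk [c], "M" ++ "-" ++ tag)])
      simp only [pvMarkRec, List.foldl_cons, pvBStep, hne, Bool.false_eq_true, if_false,
        List.isEmpty_cons, reduceIte] at this ⊢
      rw [this]
      simp [pvTailOut]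

-- scanning one whole word's segment from start = true emits A's per-word output and ends in state true
theorem pvWordScan (net tag : String) (cs : List Char) (acc : List (String × String)) :
    (pvMarkRec tag cs).foldl (pvBStep net) (true, acc) = (true, acc ++ pvAWord cs tag net) := by
  by_cases hO : (tag == net) = true
  · -- non-entity word: each char yields (ch, net); final state true for nonempty words
    have key : ∀ (ds : List Char) (s : Bool) (a : List (String × String)), ds ≠ [] →
        (pvMarkRec tag ds).foldl (pvBStep net) (s, a) =
          (true, a ++ ds.map (fun ch => (String.mk [ch], net))) := by
      intro ds
      induction ds with
      | nil => intro _ _ h; exact absurd rfl h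
      | cons c rest ih =>
        intro s a _
        rcases rest with _ | ⟨r, rs⟩
        · simp [pvMarkRec, pvBStep, hO]
        · have := ih false (a ++ [(String.mk [c], net)]) (by simp)
          simp only [pvMarkRec, List.foldl_cons, pvBStep, hO, if_true, List.isEmpty_cons] at this ⊢
          rw [this]
          simp
    rcases cs with _ | ⟨c, rest⟩
    · simp [pvMarkRec, pvAWord, hO, beq_iff_eq.mp hO]
    · rw [key (c :: rest) true acc (by simp)]
      simp [pvAWord, hO]
  · -- entity word: first char gets B/S from start = true, the tail scans with start = false
    rw [Bool.not_eq_true] at hO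
    rcases cs with _ | ⟨c, rest⟩
    · simp [pvMarkRec, pvAWord, hO]
    · have hA : pvAWord (c :: rest) tag net =
          (String.mk [c], (if rest.isEmpty then "S" else "B") ++ "-" ++ tag) :: pvTailOut tag rest := by
        apply List.ext_getElem
        · simp [pvAWord, hO, pvTailOut_length]
        · intro i h1 h2
          rcases i with _ | j
          · rcases rest with _ | ⟨r, rs⟩ <;>
              simp [pvAWord, hO, PySem.List.enumerate_cons, PySem.List.enumerate_nil,
                String.mk, List.asString]
          · have hj : j < (pvTailOut tag rest).length := by simpa using h2
            simp only [List.getElem_cons_succ, pvTailOut_getElem tag rest j hj]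
            have hjr : j < rest.length := by rw [pvTailOut_length] at hj; exact hj
            simp only [pvAWord, hO, Bool.false_eq_true, if_false, List.getElem_map,
              PySem.List.getElem_enumerate, Int.zero_add]
            rw [Prod.mk.injEq]
            refine ⟨rfl, ?_⟩
            rw [if_neg (by simp; omega)]
            by_cases hl : j = rest.length - 1
            · rw [if_pos (by simp; omega), if_pos hl]
              rfl
            · rw [if_neg (by simp; omega), if_neg hl]
              rfl
      rw [hA]
      rcases rest with _ | ⟨r, rs⟩
      · simp [pvMarkRec, pvBStep, hO, pvTailOut]
      · have := pvTailScan net tag hO (r :: rs) (by simp)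
          (acc ++ [(String.mk [c], (if (r :: rs).isEmpty then "S" else "B") ++ "-" ++ tag)])
        simp only [pvMarkRec, List.foldl_cons, pvBStep, hO, Bool.false_eq_true, if_false,
          List.isEmpty_cons, reduceIte] at this ⊢
        rw [this]
        simp

-- the stream scan over the whole flattened list equals A's fold over words
theorem pvMainScan (net : String) (wtp : List (String × String)) (acc : List (String × String)) :
    (pvBStream wtp).foldl (pvBStep net) (true, acc) =
      (true, wtp.foldl (fun a wt => a ++ pvAWord wt.1.toList wt.2 net) acc) := by
  induction wtp generalizing acc with
  | nil => simp [pvBStream]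
  | cons wt rest ih =>
    simp only [pvBStream, List.flatMap_cons, List.foldl_append, List.foldl_cons] at ih ⊢
    rw [pvSeg_eq_markRec, pvWordScan, ih]

-- ===== VERDICT =====
theorem char_bmeso_tag_stream_spec : Claim_equal_char_bmeso_tag_stream := by
  intro wtp net _
  unfold Spec_char_bmeso_tag_stream char_bmeso_tag_stream char_bmeso_tag_stream_alt
  rw [pvMainScan]
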